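-- pv_equiv track=rewrite | github.com/m3h/advent-of-code-2022 | src/day22a.py | split_instruction_str
-- ===== SOURCE A (Python) =====
-- from collections import defaultdict, namedtuple
--
-- Instruction = namedtuple("Instruction", ["steps", "turn"])
--
-- def split_instruction_str(instruction_str: str):
--     instruction_str += "X"
--     instructions = list()
--     i = 0
--     for j in range(len(instruction_str)):
--         if instruction_str[j] in ("L", "R", "X"):
--
--             steps = instruction_str[i:j]
--             turn = instruction_str[j]
--
--             instructions.append(Instruction(int(steps), turn))
--
--             i = j + 1
--
--     return instructions
-- ===== SOURCE B (Python) =====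
-- from collections import namedtuple
--
-- Instruction = namedtuple("Instruction", ["steps", "turn"])
--
-- def split_instruction_str(instruction_str: str):
--     instructions = []
--     buf = ""
--     for ch in instruction_str:
--         if ch in ("L", "R", "X"):
--             instructions.append(Instruction(int(buf), ch))
--             buf = ""
--         else:
--             buf += ch
--     instructions.append(Instruction(int(buf), "X"))
--     return instructions
-- ===== Notes on version B (the rewrite author's own statement) =====
-- stated objective: simpler
-- what changed: Replaces A's index bookkeeping (i/j over range(len) plus string slicing) with a single char-by-char pass that accumulates the current steps substring in a buffer and emits an instruction on each L/R/X, handling the trailing segment explicitly instead of via an appended sentinel scan index.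
import Mathlib
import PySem

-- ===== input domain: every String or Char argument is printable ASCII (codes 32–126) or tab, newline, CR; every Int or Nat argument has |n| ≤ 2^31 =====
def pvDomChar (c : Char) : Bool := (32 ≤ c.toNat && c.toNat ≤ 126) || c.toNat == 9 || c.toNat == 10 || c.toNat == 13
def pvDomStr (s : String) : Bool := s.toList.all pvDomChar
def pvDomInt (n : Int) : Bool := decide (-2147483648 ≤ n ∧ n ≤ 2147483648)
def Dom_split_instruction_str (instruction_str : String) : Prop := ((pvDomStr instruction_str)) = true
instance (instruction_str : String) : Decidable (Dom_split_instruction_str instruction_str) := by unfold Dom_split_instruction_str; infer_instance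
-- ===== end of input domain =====

-- B replaces A's index/slice bookkeeping by a single pass that accumulates the
-- current steps-substring in a buffer (objective: simpler, same O(n) cost).

-- ===== PORT A =====
-- A's loop body as a named helper (cs is the char list of instruction_str + "X";
-- state = (i, instructions)).  int(steps) raises ValueError where ofChars? is none;
-- those inputs are excluded by Pre_ below, the .getD 0 there is never claimed about.
def pvStepA (cs : List Char) (st : Int × List (Int × String)) (j : Int) :
    Int × List (Int × String) :=
  let c := PySem.List.pyGetD cs j ' '
  if c = 'L' ∨ c = 'R' ∨ c = 'X' then
    let steps := PySem.List.slice cs (some st.1) (some j)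
    (j + 1, st.2 ++ [((PySem.Int.ofChars? steps).getD 0, String.ofList [c])])
  else st

def split_instruction_str (instruction_str : String) : List (Int × String) :=
  let cs : List Char := instruction_str.toList ++ ['X']   -- instruction_str += "X"
  ((PySem.List.pyRange 0 (cs.length : Int) 1).foldl (pvStepA cs) (0, [])).2

-- ===== PORT B =====
-- B's loop body: state = (buf, instructions); buf collects the chars of the
-- current steps-substring.
def pvStepB (st : List Char × List (Int × String)) (c : Char) :
    List Char × List (Int × String) :=
  if c = 'L' ∨ c = 'R' ∨ c = 'X' then
    ([], st.2 ++ [((PySem.Int.ofChars? st.1).getD 0, String.ofList [c])])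
  else (st.1 ++ [c], st.2)

def split_instruction_str_alt (instruction_str : String) : List (Int × String) :=
  let st := instruction_str.toList.foldl pvStepB ([], [])
  st.2 ++ [((PySem.Int.ofChars? st.1).getD 0, "X")]

-- ===== PRECONDITION & SPEC =====
-- the maximal chunks of cs between/around the separator chars L, R, X
def pvChunks (cs : List Char) : List (List Char) :=
  cs.foldr (fun c acc =>
    if c = 'L' ∨ c = 'R' ∨ c = 'X' then [] :: acc
    else (c :: acc.headD []) :: acc.tail) [[]]

-- Pre_ excludes exactly the inputs where Python A raises ValueError: some chunk
-- between separators (or at either end) is not a valid int() literal.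
def Pre_split_instruction_str (instruction_str : String) : Prop :=
  ((pvChunks instruction_str.toList).all
    (fun g => (PySem.Int.ofChars? g).isSome)) = true
instance (instruction_str : String) : Decidable (Pre_split_instruction_str instruction_str) := by
  unfold Pre_split_instruction_str; infer_instance

def pvWitness_split_instruction_str : String := "10R5L2"

def Spec_split_instruction_str (instruction_str : String) (out : List (Int × String)) : Prop := out = split_instruction_str_alt instruction_str
instance (instruction_str : String) (out : List (Int × String)) : Decidable (Spec_split_instruction_str instruction_str out) := by unfold Spec_split_instruction_str; infer_instance

-- ===== CLAIM (what is proved, stated in full; the proofs are below) =====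
def Claim_equal_split_instruction_str : Prop := ∀ (instruction_str : String), Dom_split_instruction_str instruction_str → Pre_split_instruction_str instruction_str → Spec_split_instruction_str instruction_str (split_instruction_str instruction_str)

-- ===== LEMMAS AND PROOFS =====

-- Loop correspondence: A's index fold over the remaining range equals B's char fold
-- over the remaining suffix, when B's buffer holds exactly A's pending slice cs[i:j].
lemma pv_loopAB : ∀ (rest cs : List Char) (i j : Nat) (acc : List (Int × String)),
    j ≤ cs.length → rest = cs.drop j → i ≤ j →
    ((PySem.List.pyRange (j : Int) (cs.length : Int) 1).foldl (pvStepA cs) ((i : Int), acc)).2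
      = (rest.foldl pvStepB ((cs.drop i).take (j - i), acc)).2 := by
  intro rest
  induction rest with
  | nil =>
    intro cs i j acc hj hrest hij
    have hj' : j = cs.length := by
      have h0 : cs.drop j = [] := hrest.symm
      have := List.drop_eq_nil_iff.mp h0
      omega
    subst hj'
    rw [PySem.List.pyRange_one_eq_nil (by omega)]
    simp [List.foldl]
  | cons c rest' ih =>
    intro cs i j acc hj hrest hij
    have hjlt : j < cs.length := by
      by_contra h
      have : cs.drop j = [] := List.drop_eq_nil_iff.mpr (by omega)
      rw [this] at hrest; exact List.cons_ne_nil _ _ hrest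
    have hcons : cs.drop j = cs[j] :: cs.drop (j + 1) :=
      (List.getElem_cons_drop hjlt).symm
    rw [hcons] at hrest
    have hc : c = cs[j] := (List.cons.injEq _ _ _ _ ▸ hrest).1
    have hrest' : rest' = cs.drop (j + 1) := (List.cons.injEq _ _ _ _ ▸ hrest).2
    rw [PySem.List.pyRange_one_cons (by exact_mod_cast hjlt)]
    rw [List.foldl_cons]
    have hget : PySem.List.pyGetD cs (j : Int) ' ' = cs[j] := by
      rw [PySem.List.pyGetD_natCast]
      exact List.getD_eq_getElem _ _ hjlt
    by_cases hturn : cs[j] = 'L' ∨ cs[j] = 'R' ∨ cs[j] = 'X'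
    · -- separator: both sides emit an instruction and reset
      have hA : pvStepA cs ((i : Int), acc) (j : Int)
          = ((j : Int) + 1, acc ++ [((PySem.Int.ofChars?
              ((cs.drop i).take (j - i))).getD 0, String.ofList [cs[j]])]) := by
        simp only [pvStepA, hget, if_pos hturn]
        rw [PySem.List.slice_natCast]
      rw [hA, List.foldl_cons, hc]
      simp only [pvStepB, if_pos hturn]
      have : ((j : Int) + 1) = (((j + 1 : Nat)) : Int) := by push_cast; ring
      rw [this, ih cs (j + 1) (j + 1) _ (by omega) hrest' (by omega)]
      simp
    · -- ordinary char: A keeps state, B extends the buffer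
      have hA : pvStepA cs ((i : Int), acc) (j : Int) = ((i : Int), acc) := by
        simp only [pvStepA, hget, if_neg hturn]
      rw [hA, List.foldl_cons, hc]
      simp only [pvStepB, if_neg hturn]
      have hbuf : (cs.drop i).take (j - i) ++ [cs[j]]
          = (cs.drop i).take (j + 1 - i) := by
        have hlt : j - i < (cs.drop i).length := by
          rw [List.length_drop]; omega
        have : j + 1 - i = (j - i) + 1 := by omega
        rw [this, List.take_add_one]
        have : (cs.drop i)[j - i]? = some cs[j] := by
          rw [List.getElem?_drop]
          have : i + (j - i) = j := by omega
          rw [this, List.getElem?_eq_getElem hjlt]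
        simp [this]
      have hcast : ((j : Int) + 1) = (((j + 1 : Nat)) : Int) := by push_cast; ring
      rw [hcast, hbuf, ih cs i (j + 1) _ (by omega) hrest' (by omega)]

-- ===== VERDICT (by name: the statement is the Claim_ definition above) =====
theorem split_instruction_str_spec : Claim_equal_split_instruction_str := by
  intro s _ _
  unfold Spec_split_instruction_str split_instruction_str split_instruction_str_alt
  have h := pv_loopAB (s.toList ++ ['X']) (s.toList ++ ['X']) 0 0 [] (by omega) rfl (by omega)
  simp only [Nat.cast_zero, List.drop_zero] at h
  rw [h, List.foldl_append]
  have hstep : pvStepB (s.toList.foldl pvStepB ([], [])) 'X'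
      = ([], (s.toList.foldl pvStepB ([], [])).2
          ++ [((PySem.Int.ofChars? (s.toList.foldl pvStepB ([], [])).1).getD 0,
               String.ofList ['X'])]) := by
    simp [pvStepB]
  simp [hstep]
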